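-- pv_equiv track=rewrite | github.com/notifuturo/cyberfuturo | scripts/build_index_arxiv_ai.py | trailing_months
-- ===== SOURCE A (Python) =====
-- def trailing_months(end_year: int, end_month: int, n: int) -> list[tuple[int, int]]:
--     months: list[tuple[int, int]] = []
--     y, m = end_year, end_month
--     for _ in range(n):
--         months.append((y, m))
--         m -= 1
--         if m == 0:
--             m = 12
--             y -= 1
--     months.reverse()
--     return months
-- ===== SOURCE B (Python) =====
-- def trailing_months(end_year: int, end_month: int, n: int) -> list[tuple[int, int]]:
--     # Closed form: number each month since year 0, take the last n indices in order.
--     end = end_year * 12 + end_month - 1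
--     return [(idx // 12, idx % 12 + 1) for idx in range(end - n + 1, end + 1)]
-- ===== Notes on version B (the rewrite author's own statement) =====
-- stated objective: simpler
-- what changed: Replaces the step-back (y,m) state machine with wrap guard and final reverse() by a closed form over absolute month indices (end_year*12+end_month-1), emitted by one forward range in ascending order; Pre_ requires a real month 1..12 whenever n>=1, since for out-of-range months A emits the literal month value unwrapped while the closed form normalizes it.
-- outside the precondition, e.g. on trailing_months(2020, 0, 2): A returns [(2020, -1), (2020, 0)], B returns [(2019, 11), (2019, 12)]; on trailing_months(2020, 13, 1): A returns [(2020, 13)], B returns [(2021, 1)]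
import Mathlib
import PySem

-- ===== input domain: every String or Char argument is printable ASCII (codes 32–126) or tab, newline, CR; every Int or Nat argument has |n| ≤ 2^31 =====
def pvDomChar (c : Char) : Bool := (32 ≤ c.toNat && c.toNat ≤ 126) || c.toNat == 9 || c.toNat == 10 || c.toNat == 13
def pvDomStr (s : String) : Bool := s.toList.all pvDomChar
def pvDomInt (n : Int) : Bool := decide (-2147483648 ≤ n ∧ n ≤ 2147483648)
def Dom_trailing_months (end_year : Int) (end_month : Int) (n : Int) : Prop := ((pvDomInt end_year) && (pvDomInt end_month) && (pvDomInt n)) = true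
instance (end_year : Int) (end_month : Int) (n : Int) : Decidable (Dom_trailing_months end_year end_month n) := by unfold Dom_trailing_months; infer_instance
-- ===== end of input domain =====

-- B replaces A's step-back (y,m) state machine with wrap guard and final reverse by a
-- closed form over absolute month indices, emitted in ascending order (simpler).

-- ===== PORT A =====
-- the for-loop of A: k remaining iterations, state (y, m), accumulator of appended pairs
def pvALoop (k : Nat) (y m : Int) (acc : List (Int × Int)) : List (Int × Int) :=
  match k with
  | 0 => acc
  | k + 1 =>
    let acc' := acc ++ [(y, m)]
    let m' := m - 1
    if m' = 0 then pvALoop k (y - 1) 12 acc' else pvALoop k y m' acc'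

def trailing_months (end_year : Int) (end_month : Int) (n : Int) : List (Int × Int) :=
  (pvALoop n.toNat end_year end_month []).reverse

-- ===== PORT B =====
def trailing_months_alt (end_year : Int) (end_month : Int) (n : Int) : List (Int × Int) :=
  let e := end_year * 12 + end_month - 1
  (PySem.List.pyRange (e - n + 1) (e + 1) 1).map
    (fun idx => (PySem.Int.floordiv idx 12, PySem.Int.mod idx 12 + 1))

-- ===== PRECONDITION & SPEC =====
-- Pre_ requires a real month 1..12 whenever any months are requested (n ≥ 1), the function's
-- natural domain; for out-of-range months A emits literal out-of-range month values unchanged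
-- while B's closed form normalizes them (for n ≤ 0 both return []).
def Pre_trailing_months (end_year : Int) (end_month : Int) (n : Int) : Prop :=
  1 ≤ n → (1 ≤ end_month ∧ end_month ≤ 12)
instance (end_year : Int) (end_month : Int) (n : Int) : Decidable (Pre_trailing_months end_year end_month n) := by unfold Pre_trailing_months; infer_instance

def pvWitness_trailing_months : Int × Int × Int := (2024, 3, 5)

def Spec_trailing_months (end_year : Int) (end_month : Int) (n : Int) (out : List (Int × Int)) : Prop := out = trailing_months_alt end_year end_month n
instance (end_year : Int) (end_month : Int) (n : Int) (out : List (Int × Int)) : Decidable (Spec_trailing_months end_year end_month n out) := by unfold Spec_trailing_months; infer_instance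

-- ===== CLAIM (what is proved, stated in full; the proofs are below) =====
def Claim_equal_trailing_months : Prop := ∀ (end_year : Int) (end_month : Int) (n : Int), Dom_trailing_months end_year end_month n → Pre_trailing_months end_year end_month n → Spec_trailing_months end_year end_month n (trailing_months end_year end_month n)

-- ===== LEMMAS AND PROOFS =====

-- B's per-index closed form
def pvF (idx : Int) : Int × Int := (PySem.Int.floordiv idx 12, PySem.Int.mod idx 12 + 1)

theorem pvF_eq (y m : Int) (h1 : 1 ≤ m) (h2 : m ≤ 12) : pvF (y * 12 + m - 1) = (y, m) := by
  unfold pvF PySem.Int.floordiv PySem.Int.mod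
  rw [Int.fdiv_eq_ediv_of_nonneg _ (by norm_num : (0 : Int) ≤ 12),
      Int.fmod_eq_emod_of_nonneg _ (by norm_num : (0 : Int) ≤ 12)]
  refine Prod.ext ?_ ?_ <;> simp <;> omega

-- A's loop, run from a valid month, appends the closed-form pairs of the k indices ending at e
theorem pvALoop_eq (k : Nat) (y m : Int) (acc : List (Int × Int))
    (h1 : 1 ≤ m) (h2 : m ≤ 12) :
    pvALoop k y m acc =
      acc ++ ((PySem.List.pyRange (y * 12 + m - 1 - k + 1) (y * 12 + m - 1 + 1) 1).map pvF).reverse := by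
  induction k generalizing y m acc with
  | zero => simp [pvALoop]
  | succ k ih =>
    set e : Int := y * 12 + m - 1 with he
    have hsplit : PySem.List.pyRange (e - (k + 1 : Nat) + 1) (e + 1) 1
        = PySem.List.pyRange (e - (k + 1 : Nat) + 1) e 1 ++ [e] := by
      have := PySem.List.pyRange_one_succ_right (a := e - (k + 1 : Nat) + 1) (b := e)
        (by push_cast; omega)
      simpa using this
    show (if m - 1 = 0 then pvALoop k (y - 1) 12 (acc ++ [(y, m)])
        else pvALoop k y (m - 1) (acc ++ [(y, m)])) = _
    rw [hsplit, List.map_append, List.reverse_append]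
    have hym : pvF e = (y, m) := pvF_eq y m h1 h2
    split_ifs with h
    · rw [ih (y - 1) 12 (acc ++ [(y, m)]) (by norm_num) (by norm_num)]
      have harg : (y - 1) * 12 + 12 - 1 = e - 1 := by omega
      rw [harg]
      have hlo : e - 1 - (k : Int) + 1 = e - (k + 1 : Nat) + 1 := by push_cast; omega
      have hhi : e - 1 + 1 = e := by ring
      rw [hlo, hhi]
      simp [hym]
    · rw [ih y (m - 1) (acc ++ [(y, m)]) (by omega) (by omega)]
      have harg : y * 12 + (m - 1) - 1 = e - 1 := by omega
      rw [harg]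
      have hlo : e - 1 - (k : Int) + 1 = e - (k + 1 : Nat) + 1 := by push_cast; omega
      have hhi : e - 1 + 1 = e := by ring
      rw [hlo, hhi]
      simp [hym]

-- ===== VERDICT (by name: the statement is the Claim_ definition above) =====
theorem trailing_months_spec : Claim_equal_trailing_months := by
  intro y m n _ hpre
  unfold Spec_trailing_months trailing_months trailing_months_alt
  by_cases hn : 1 ≤ n
  · obtain ⟨h1, h2⟩ := hpre hn
    rw [pvALoop_eq n.toNat y m [] h1 h2]
    simp only [List.nil_append, List.reverse_reverse]
    rw [Int.toNat_of_nonneg (by omega)]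
    rfl
  · rw [show n.toNat = 0 by omega]
    have h := PySem.List.pyRange_one_eq_nil
      (a := y * 12 + m - 1 - n + 1) (b := y * 12 + m) (by omega)
    simp [pvALoop, h]
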